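-- pv_equiv track=rewrite | github.com/kangjunkyu/Algorithm | 백준/Silver/26122. 가장 긴 막대 자석/가장 긴 막대 자석.py | find_longest_magnetic_substring
-- ===== SOURCE A (Python) =====
-- def find_longest_magnetic_substring(n, s):
--     max_length = 0
--     segments = []
--     current_char = s[0]
--     current_length = 0
--
--     for char in s:
--         if char == current_char:
--             current_length += 1
--         else:
--             segments.append(current_length)
--             current_char = char
--             current_length = 1
--     segments.append(current_length)
--
--     for i in range(1, len(segments)):
--         max_length = max(max_length, 2 * min(segments[i-1], segments[i]))
--
--     return max_length
-- ===== SOURCE B (Python) =====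
-- def find_longest_magnetic_substring(n, s):
--     current_char = s[0]  # same IndexError on empty input as the original
--     max_length = 0
--     prev_length = None
--     current_length = 0
--     for char in s:
--         if char == current_char:
--             current_length += 1
--         else:
--             if prev_length is not None:
--                 max_length = max(max_length, 2 * min(prev_length, current_length))
--             prev_length = current_length
--             current_char = char
--             current_length = 1
--     if prev_length is not None:
--         max_length = max(max_length, 2 * min(prev_length, current_length))
--     return max_length
-- ===== Notes on version B (the rewrite author's own statement) =====
-- stated objective: alternative
-- what changed: B fuses A's two passes into one linear scan that never materializes the run-length segments list, tracking only the previous run's length and folding the 2*min pair-max in as runs end.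
import Mathlib
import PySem

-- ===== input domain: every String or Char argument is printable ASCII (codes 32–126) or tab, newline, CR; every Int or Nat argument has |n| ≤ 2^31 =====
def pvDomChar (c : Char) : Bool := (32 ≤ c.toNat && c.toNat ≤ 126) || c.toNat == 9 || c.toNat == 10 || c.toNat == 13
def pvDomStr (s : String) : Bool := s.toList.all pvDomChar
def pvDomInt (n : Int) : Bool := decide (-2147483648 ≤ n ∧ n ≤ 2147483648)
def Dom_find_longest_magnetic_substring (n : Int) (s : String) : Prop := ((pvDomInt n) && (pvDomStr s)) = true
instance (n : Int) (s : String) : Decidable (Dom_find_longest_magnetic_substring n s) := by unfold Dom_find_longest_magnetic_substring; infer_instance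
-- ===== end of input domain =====

-- B fuses A's two passes into one: it never materializes the run-length `segments` list,
-- tracking only the previous run's length while scanning (alternative decomposition, same O(n) cost).

-- ===== PORT A =====
-- loop body of A's first for-loop: state = (segments, current_char, current_length)
def stepA_flms (st : List Int × Char × Int) (ch : Char) : List Int × Char × Int :=
  if ch == st.2.1 then (st.1, st.2.1, st.2.2 + 1) else (st.1 ++ [st.2.2], ch, 1)

def find_longest_magnetic_substring (n : Int) (s : String) : Int :=
  match PySem.Chars.pyGet? s.toList 0 with   -- s[0]; none = IndexError, excluded by Pre_
  | none => 0
  | some c0 =>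
    let st := s.toList.foldl stepA_flms ([], c0, 0)
    let segments := st.1 ++ [st.2.2]
    (PySem.List.pyRange 1 (segments.length : Int) 1).foldl
      (fun m i => max m (2 * min (PySem.List.pyGetD segments (i - 1) 0)
                                 (PySem.List.pyGetD segments i 0))) 0

-- ===== PORT B =====
-- loop body of B's for-loop: state = (max_length, current_char, current_length, prev_length)
def stepB_flms (st : Int × Char × Int × Option Int) (ch : Char) : Int × Char × Int × Option Int :=
  if ch == st.2.1 then (st.1, st.2.1, st.2.2.1 + 1, st.2.2.2)
  else
    (match st.2.2.2 with
     | some p => max st.1 (2 * min p st.2.2.1)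
     | none => st.1, ch, 1, some st.2.2.1)

-- B's finalize step after the loop
def finB_flms (st : Int × Char × Int × Option Int) : Int :=
  match st.2.2.2 with
  | some p => max st.1 (2 * min p st.2.2.1)
  | none => st.1

def find_longest_magnetic_substring_alt (n : Int) (s : String) : Int :=
  match PySem.Chars.pyGet? s.toList 0 with   -- s[0]; same IndexError on empty input
  | none => 0
  | some c0 => finB_flms (s.toList.foldl stepB_flms (0, c0, 0, none))

-- ===== PRECONDITION & SPEC =====
-- Both programs raise IndexError on the empty string (s[0]); Pre_ excludes exactly that.
def Pre_find_longest_magnetic_substring (n : Int) (s : String) : Prop := s.toList ≠ []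
instance (n : Int) (s : String) : Decidable (Pre_find_longest_magnetic_substring n s) := by
  unfold Pre_find_longest_magnetic_substring; infer_instance
def pvWitness_find_longest_magnetic_substring : Int × String := (3, "aabbb")

def Spec_find_longest_magnetic_substring (n : Int) (s : String) (out : Int) : Prop := out = find_longest_magnetic_substring_alt n s
instance (n : Int) (s : String) (out : Int) : Decidable (Spec_find_longest_magnetic_substring n s out) := by unfold Spec_find_longest_magnetic_substring; infer_instance

-- ===== CLAIM (what is proved, stated in full; the proofs are below) =====
def Claim_equal_find_longest_magnetic_substring : Prop := ∀ (n : Int) (s : String), Dom_find_longest_magnetic_substring n s → Pre_find_longest_magnetic_substring n s → Spec_find_longest_magnetic_substring n s (find_longest_magnetic_substring n s)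

-- ===== LEMMAS AND PROOFS =====

-- the list of adjacent pairs of the segments list
def adjPairs_flms : List Int → List (Int × Int)
  | a :: b :: t => (a, b) :: adjPairs_flms (b :: t)
  | _ => []

-- the value A's second loop computes from a segments list
def maxOf_flms (segs : List Int) : Int :=
  (adjPairs_flms segs).foldl (fun m p => max m (2 * min p.1 p.2)) 0

theorem adjPairs_flms_concat (segs : List Int) (p x : Int) (h : segs.getLast? = some p) :
    adjPairs_flms (segs ++ [x]) = adjPairs_flms segs ++ [(p, x)] := by
  induction segs with
  | nil => simp at h
  | cons a t ih =>
    cases t with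
    | nil => simp_all [adjPairs_flms]
    | cons b t2 =>
      rw [List.getLast?_cons_cons] at h
      simpa [adjPairs_flms] using ih h

theorem maxOf_flms_concat (segs : List Int) (x : Int) :
    maxOf_flms (segs ++ [x]) =
      match segs.getLast? with
      | some p => max (maxOf_flms segs) (2 * min p x)
      | none => 0 := by
  cases h : segs.getLast? with
  | none =>
    have : segs = [] := by cases segs <;> simp_all
    subst this; simp [maxOf_flms, adjPairs_flms]
  | some p =>
    simp [maxOf_flms, adjPairs_flms_concat segs p x h, List.foldl_append]

theorem pyGetD_append_left_flms (xs ys : List Int) (i : Int) (d : Int)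
    (h0 : 0 ≤ i) (h1 : i < (xs.length : Int)) :
    PySem.List.pyGetD (xs ++ ys) i d = PySem.List.pyGetD xs i d := by
  have hlt : i < ((xs ++ ys).length : Int) := by simp; omega
  rw [PySem.List.pyGetD_eq_getElem (xs ++ ys) d h0 hlt, PySem.List.pyGetD_eq_getElem xs d h0 h1]
  exact List.getElem_append_left (by omega)

-- A's second loop over `segments` computes maxOf_flms segments
theorem rangeFold_eq_maxOf (segs : List Int) :
    (PySem.List.pyRange 1 (segs.length : Int) 1).foldl
      (fun m i => max m (2 * min (PySem.List.pyGetD segs (i - 1) 0)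
                                 (PySem.List.pyGetD segs i 0))) 0 = maxOf_flms segs := by
  induction segs using List.reverseRecOn with
  | nil => simp [PySem.List.pyRange_one_eq_nil, maxOf_flms, adjPairs_flms]
  | append_singleton segs x ih =>
    cases hsegs : segs with
    | nil =>
      subst hsegs
      simp [PySem.List.pyRange_one_eq_nil, maxOf_flms, adjPairs_flms]
    | cons a t =>
      have hlen : 1 ≤ (segs.length : Int) := by simp [hsegs]
      rw [← hsegs]
      have hcast : (((segs ++ [x]).length : Nat) : Int) = (segs.length : Int) + 1 := by
        simp
      rw [hcast, PySem.List.pyRange_one_succ_right hlen, List.foldl_append]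
      have hcongr :
          (PySem.List.pyRange 1 (segs.length : Int) 1).foldl
            (fun m i => max m (2 * min (PySem.List.pyGetD (segs ++ [x]) (i - 1) 0)
                                       (PySem.List.pyGetD (segs ++ [x]) i 0))) 0 =
          (PySem.List.pyRange 1 (segs.length : Int) 1).foldl
            (fun m i => max m (2 * min (PySem.List.pyGetD segs (i - 1) 0)
                                       (PySem.List.pyGetD segs i 0))) 0 := by
        apply PySem.List.foldl_congr_mem
        intro m i hi
        rw [PySem.List.mem_pyRange_one] at hi
        rw [pyGetD_append_left_flms segs [x] (i - 1) 0 (by omega) (by omega),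
            pyGetD_append_left_flms segs [x] i 0 (by omega) hi.2]
      rw [hcongr, ih]
      -- last pair: indices segs.length - 1 and segs.length
      have hlast : PySem.List.pyGetD (segs ++ [x]) (segs.length : Int) 0 = x := by
        rw [PySem.List.pyGetD_eq_getElem (segs ++ [x]) 0 (by omega) (by simp)]
        simp
      have hget : segs.getLast? = some segs[segs.length - 1] := by
        rw [List.getLast?_eq_getElem?]
        exact (List.getElem?_eq_some_iff.mpr ⟨by simp [hsegs], rfl⟩)
      have hprev : PySem.List.pyGetD (segs ++ [x]) ((segs.length : Int) - 1) 0
          = segs[segs.length - 1] := by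
        rw [pyGetD_append_left_flms segs [x] _ 0 (by omega) (by omega),
            PySem.List.pyGetD_eq_getElem segs 0 (by omega) (by omega)]
        congr 1
        omega
      rw [maxOf_flms_concat, hget]
      simp only [List.foldl_cons, List.foldl_nil]
      rw [hlast, hprev]

-- the fused loop of B computes, from matching states, A's maxOf of the final segments list
theorem fused_eq (chars : List Char) :
    ∀ (segs : List Int) (cc : Char) (cl : Int),
      finB_flms (chars.foldl stepB_flms (maxOf_flms segs, cc, cl, segs.getLast?)) =
      maxOf_flms ((chars.foldl stepA_flms (segs, cc, cl)).1 ++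
                  [(chars.foldl stepA_flms (segs, cc, cl)).2.2]) := by
  induction chars with
  | nil =>
    intro segs cc cl
    simp only [List.foldl_nil, finB_flms, maxOf_flms_concat]
    cases h : segs.getLast? with
    | none =>
      have : segs = [] := by cases segs <;> simp_all
      subst this; simp [maxOf_flms, adjPairs_flms]
    | some p => simp
  | cons ch rest ih =>
    intro segs cc cl
    simp only [List.foldl_cons, stepA_flms, stepB_flms]
    by_cases hc : (ch == cc) = true
    · simp only [hc, if_pos]
      exact ih segs cc (cl + 1)
    · simp only [hc, if_neg, Bool.not_eq_true]
      have hm : (match segs.getLast? with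
                 | some p => max (maxOf_flms segs) (2 * min p cl)
                 | none => maxOf_flms segs) = maxOf_flms (segs ++ [cl]) := by
        rw [maxOf_flms_concat]
        cases h : segs.getLast? with
        | none =>
          have : segs = [] := by cases segs <;> simp_all
          subst this; simp [maxOf_flms, adjPairs_flms]
        | some p => simp
      have hl : some cl = (segs ++ [cl]).getLast? := by simp
      rw [hm, hl]
      exact ih (segs ++ [cl]) ch 1

-- ===== VERDICT (by name: the statement is the Claim_ definition above) =====
theorem find_longest_magnetic_substring_spec : Claim_equal_find_longest_magnetic_substring := by
  intro n s _hdom hpre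
  unfold Pre_find_longest_magnetic_substring at hpre
  unfold Spec_find_longest_magnetic_substring
  unfold find_longest_magnetic_substring find_longest_magnetic_substring_alt
  cases h : s.toList with
  | nil => exact absurd h hpre
  | cons c0 rest =>
    simp only [PySem.Chars.pyGet?_eq_listPyGet?, PySem.List.pyGet?_zero_cons]
    rw [rangeFold_eq_maxOf]
    have := fused_eq (c0 :: rest) [] c0 0
    simp only [maxOf_flms, adjPairs_flms, List.foldl_nil, List.getLast?_nil] at this
    exact this.symm
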